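-- pv_equiv track=rewrite | github.com/ledermauss/katas | 04-data_munging/weather.py | get_content_ends
-- ===== SOURCE A (Python) =====
-- def get_content_ends(header):
--     ends = []
--     for i in range(1, len(header)):
--         if not is_char(header[i]) and is_char(header[i-1]):
--             ends.append(i-1)
--     if is_char(header[-1]):
--         ends.append(len(header)-1)
--     return ends
--
-- def is_char(c):
--     return c != " "
-- ===== SOURCE B (Python) =====
-- def get_content_ends(header):
--     # staged approach: tokenize on " ", then compute each token's end index
--     # from cumulative offsets (start of token j = sum of len+1 of earlier tokens)
--     ends = []
--     pos = 0
--     for tok in header.split(" "):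
--         if tok:
--             ends.append(pos + len(tok) - 1)
--         pos += len(tok) + 1
--     return ends
-- ===== Notes on version B (the rewrite author's own statement) =====
-- stated objective: faster
-- what changed: Replaces A's character-pairwise index scan (comparing header[i] with header[i-1] plus an unconditional header[-1] check) with a staged tokenization: split the header on ' ' and compute each non-empty token's end index from cumulative token-length offsets; str.split runs at C speed, removing the per-character Python-level loop.
import Mathlib
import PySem

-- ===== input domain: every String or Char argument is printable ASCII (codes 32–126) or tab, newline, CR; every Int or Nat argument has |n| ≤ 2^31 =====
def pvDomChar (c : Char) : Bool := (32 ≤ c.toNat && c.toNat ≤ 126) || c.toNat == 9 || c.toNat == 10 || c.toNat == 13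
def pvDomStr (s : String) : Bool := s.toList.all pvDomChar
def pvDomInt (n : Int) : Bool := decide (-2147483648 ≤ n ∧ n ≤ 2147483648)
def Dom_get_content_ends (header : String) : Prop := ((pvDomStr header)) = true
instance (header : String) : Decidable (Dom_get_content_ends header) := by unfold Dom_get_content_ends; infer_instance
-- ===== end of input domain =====

-- B replaces A's pairwise character scan by split(" ") + cumulative token-length offsets;
-- equal on all non-empty headers (A raises IndexError on "", where B returns []).


-- ===== PORT A =====
def is_char (c : Char) : Bool := c != ' '

-- literal port of A; header[i] / header[i-1] / header[-1] via pyGetD (the loop indices are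
-- always in range; header[-1] is in range exactly on Pre_, outside of which Python raises IndexError)
def get_content_ends (header : String) : List Int :=
  let s := header.toList
  let ends : List Int :=
    (PySem.List.pyRange 1 (s.length : Int) 1).foldl
      (fun ends i =>
        if !(is_char (PySem.List.pyGetD s i ' ')) && is_char (PySem.List.pyGetD s (i - 1) ' ')
        then ends ++ [i - 1] else ends) []
  if is_char (PySem.List.pyGetD s (-1) ' ') then ends ++ [(s.length : Int) - 1] else ends

-- ===== PORT B =====
-- literal port of B: header.split(" ") (PySem.Chars.splitOn, the sep ≠ "" form of Python split),
-- then one fold over the tokens carrying (ends, pos)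
def get_content_ends_alt (header : String) : List Int :=
  let toks := PySem.Chars.splitOn header.toList [' ']
  let r : List Int × Int :=
    toks.foldl
      (fun (st : List Int × Int) tok =>
        ((if tok ≠ [] then st.1 ++ [st.2 + (tok.length : Int) - 1] else st.1),
         st.2 + (tok.length : Int) + 1)) ([], 0)
  r.1

-- ===== PRECONDITION & SPEC =====
-- Pre_ excludes only the empty string, on which A raises IndexError (header[-1]); B returns [] there.
def Pre_get_content_ends (header : String) : Prop := header ≠ ""
instance (header : String) : Decidable (Pre_get_content_ends header) := by
  unfold Pre_get_content_ends; infer_instance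

def pvWitness_get_content_ends : String := "ab c"

def Spec_get_content_ends (header : String) (out : List Int) : Prop := out = get_content_ends_alt header
instance (header : String) (out : List Int) : Decidable (Spec_get_content_ends header out) := by
  unfold Spec_get_content_ends; infer_instance

-- ===== CLAIM (what is proved, stated in full; the proofs are below) =====
def Claim_equal_get_content_ends : Prop := ∀ (header : String), Dom_get_content_ends header → Pre_get_content_ends header → Spec_get_content_ends header (get_content_ends header)

-- ===== LEMMAS AND PROOFS =====

-- common reference recursion: chars of t sit at indices k, k+1, ...; w = "previous char was non-space"
def scanEnds : List Char → Bool → Int → List Int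
  | [], w, k => if w then [k - 1] else []
  | c :: t, w, k => (if c == ' ' && w then [k - 1] else []) ++ scanEnds t (c != ' ') (k + 1)

-- B's fold step
def stepB (st : List Int × Int) (tok : List Char) : List Int × Int :=
  ((if tok ≠ [] then st.1 ++ [st.2 + (tok.length : Int) - 1] else st.1),
   st.2 + (tok.length : Int) + 1)

theorem go_zero (sep l cur : List Char) (acc : List (List Char)) :
    PySem.Chars.splitOn.go sep 0 l cur acc = ((cur.reverse ++ l) :: acc).reverse := rfl

theorem go_nil (sep cur : List Char) (acc : List (List Char)) (f : Nat) :
    PySem.Chars.splitOn.go sep (f+1) [] cur acc = (cur.reverse :: acc).reverse := rfl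

theorem go_cons (sep cur : List Char) (acc : List (List Char)) (f : Nat) (c : Char) (rest : List Char) :
    PySem.Chars.splitOn.go sep (f+1) (c::rest) cur acc =
      if sep.isPrefixOf (c::rest)
      then PySem.Chars.splitOn.go sep f (List.drop sep.length (c::rest)) [] (cur.reverse :: acc)
      else PySem.Chars.splitOn.go sep f rest (c :: cur) acc := rfl

-- accumulator of go is only prepended to
theorem go_acc (sep : List Char) (f : Nat) : ∀ (l cur : List Char) (acc : List (List Char)),
    PySem.Chars.splitOn.go sep f l cur acc
      = acc.reverse ++ PySem.Chars.splitOn.go sep f l cur [] := by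
  induction f with
  | zero => intro l cur acc; simp [go_zero]
  | succ f ih =>
    intro l cur acc
    cases l with
    | nil => simp [go_nil]
    | cons c rest =>
      rw [go_cons, go_cons]
      split_ifs
      · rw [ih _ [] (cur.reverse :: acc), ih _ [] [cur.reverse]]
        simp
      · exact ih rest (c :: cur) acc

-- the fold of B over the tokens produced by go (single-char sep ' ') computes scanEnds;
-- cur is the reversed partial current token, pos the index where it starts
theorem foldB_go (l : List Char) : ∀ (f : Nat), l.length ≤ f →
    ∀ (cur : List Char) (ends : List Int) (pos : Int),
    (List.foldl stepB (ends, pos) (PySem.Chars.splitOn.go [' '] f l cur [])).1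
      = ends ++ scanEnds l (decide (cur ≠ [])) (pos + (cur.length : Int)) := by
  induction l with
  | nil =>
    intro f _ cur ends pos
    cases f with
    | zero =>
      simp only [go_zero, List.append_nil, List.reverse_singleton, List.foldl_cons,
        List.foldl_nil, stepB, scanEnds]
      cases hc : decide (cur ≠ []) <;> simp_all
    | succ f =>
      simp only [go_nil, List.reverse_singleton, List.foldl_cons, List.foldl_nil, stepB, scanEnds]
      cases hc : decide (cur ≠ []) <;> simp_all
  | cons c rest ih =>
    intro f hf cur ends pos
    cases f with
    | zero => simp at hf
    | succ f =>
      have hf' : rest.length ≤ f := by simp at hf; omega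
      rw [go_cons]
      by_cases hc : c = ' '
      · subst hc
        have hp : List.isPrefixOf [' '] (' ' :: rest) = true := by
          simp [List.isPrefixOf]
        rw [if_pos hp]
        have hd : List.drop ([' '] : List Char).length (' '::rest) = rest := rfl
        rw [hd, go_acc, List.foldl_append]
        simp only [List.reverse_singleton, List.foldl_cons, List.foldl_nil, stepB]
        have := ih f hf' [] (if cur.reverse ≠ [] then ends ++ [pos + (cur.reverse.length : Int) - 1] else ends)
          (pos + (cur.reverse.length : Int) + 1)
        rw [this]
        simp only [scanEnds, BEq.rfl, Bool.true_and, List.length_reverse, List.length_nil,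
          Nat.cast_zero, add_zero]
        by_cases hcur : cur = []
        · subst hcur; simp
        · have h1 : cur.reverse ≠ [] := by simp [hcur]
          simp only [if_pos h1, decide_eq_true hcur, List.append_assoc]
          rfl
      · have hp : List.isPrefixOf [' '] (c :: rest) = false := by
          simp [List.isPrefixOf]; intro h; exact absurd h.symm hc
        rw [if_neg (by simp [hp])]
        have := ih f hf' (c :: cur) ends pos
        rw [this]
        simp only [scanEnds, List.length_cons]
        have hcb : (c == ' ') = false := by simp [hc]
        have hcn : (c != ' ') = true := by simp [hc]
        rw [hcb, hcn]
        simp only [Bool.false_and, if_neg (by simp : ¬ (false = true)), List.nil_append]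
        have : decide (c :: cur ≠ []) = true := by simp
        rw [this]
        congr 1
        push_cast
        ring

-- B computes scanEnds of the whole string
theorem altB (header : String) :
    get_content_ends_alt header = scanEnds header.toList false 0 := by
  unfold get_content_ends_alt PySem.Chars.splitOn
  have h := foldB_go header.toList (header.toList.length + 1) (by omega) [] [] 0
  simp only [List.length_nil, Nat.cast_zero, add_zero, decide_not] at h
  have hs : (List.foldl stepB ([], 0) (PySem.Chars.splitOn.go [' '] (header.toList.length + 1) header.toList [] [])).1
      = scanEnds header.toList false 0 := by
    simpa using h
  exact hs

theorem lemA (s : List Char) (m : Nat) : ∀ (k : Nat), s.length - (k + 1) = m → k < s.length →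
    ∀ acc : List Int,
    ((PySem.List.pyRange ((k : Int) + 1) (s.length : Int) 1).foldl
      (fun ends i =>
        if !(is_char (PySem.List.pyGetD s i ' ')) && is_char (PySem.List.pyGetD s (i - 1) ' ')
        then ends ++ [i - 1] else ends) acc)
      ++ (if is_char (PySem.List.pyGetD s (-1) ' ') then [(s.length : Int) - 1] else [])
    = acc ++ scanEnds (s.drop (k + 1)) (is_char (PySem.List.pyGetD s (k : Int) ' ')) ((k : Int) + 1) := by
  induction m with
  | zero =>
    intro k hm hk acc
    have hlen : s.length = k + 1 := by omega
    have hne : s ≠ [] := by intro h; simp [h] at hk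
    have hnil : PySem.List.pyRange ((k : Int) + 1) (s.length : Int) 1 = [] := by
      apply PySem.List.pyRange_one_eq_nil; omega
    have hdrop : s.drop (k + 1) = [] := by
      apply List.drop_eq_nil_of_le; omega
    have hget : PySem.List.pyGetD s (-1) ' ' = PySem.List.pyGetD s (k : Int) ' ' := by
      rw [PySem.List.pyGetD_neg_one s ' ' hne,
          PySem.List.pyGetD_eq_getElem s ' ' (by omega) (by omega),
          List.getLast_eq_getElem]
      congr 1
      omega
    rw [hnil, hdrop, hget]
    simp only [List.foldl_nil, scanEnds]
    cases hw : is_char (PySem.List.pyGetD s (k : Int) ' ') <;> simp [hlen]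
  | succ m ih =>
    intro k hm hk acc
    have hk1 : k + 1 < s.length := by omega
    have hcons : PySem.List.pyRange ((k : Int) + 1) (s.length : Int) 1
        = ((k : Int) + 1) :: PySem.List.pyRange ((k : Int) + 1 + 1) (s.length : Int) 1 := by
      apply PySem.List.pyRange_one_cons; omega
    have hdrop : s.drop (k + 1) = s[k + 1] :: s.drop (k + 1 + 1) := by
      rw [List.drop_eq_getElem_cons hk1]
    have hg1 : PySem.List.pyGetD s ((k : Int) + 1) ' ' = s[k + 1] := by
      rw [show ((k : Int) + 1) = ((k + 1 : Nat) : Int) by push_cast; ring,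
        PySem.List.pyGetD_eq_getElem s ' ' (by omega) (by push_cast; omega)]
      simp
    have hg0 : PySem.List.pyGetD s ((k : Int) + 1 - 1) ' ' = PySem.List.pyGetD s (k : Int) ' ' := by
      norm_num
    have ih2 : ∀ acc' : List Int,
        ((PySem.List.pyRange ((k : Int) + 1 + 1) (s.length : Int) 1).foldl
          (fun ends i =>
            if !(PySem.List.pyGetD s i ' ' != ' ') && (PySem.List.pyGetD s (i - 1) ' ' != ' ')
            then ends ++ [i - 1] else ends) acc')
          ++ (if (PySem.List.pyGetD s (-1) ' ' != ' ') then [(s.length : Int) - 1] else [])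
        = acc' ++ scanEnds (s.drop (k + 1 + 1)) (s[k + 1] != ' ') ((k : Int) + 1 + 1) := by
      intro acc'
      have hcast := ih (k + 1) (by omega) hk1 acc'
      rw [show ((k + 1 : Nat) : Int) = (k : Int) + 1 by push_cast; ring, hg1] at hcast
      simpa only [is_char] using hcast
    rw [hcons]
    simp only [List.foldl_cons, hg0, hg1, hdrop, scanEnds, is_char]
    have hnn : (!(s[k + 1] != ' ')) = (s[k + 1] == ' ') := by simp [bne]
    rw [hnn]
    by_cases hc : ((s[k + 1] == ' ') && (PySem.List.pyGetD s (k : Int) ' ' != ' ')) = true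
    · rw [if_pos hc, if_pos hc]
      refine (ih2 (acc ++ [(k : Int) + 1 - 1])).trans ?_
      simp [List.append_assoc]
    · rw [if_neg hc, if_neg hc]
      refine (ih2 acc).trans ?_
      simp

-- ===== VERDICT (by name: the statement is the Claim_ definition above) =====
theorem get_content_ends_spec : Claim_equal_get_content_ends := by
  intro header _ hpre
  unfold Spec_get_content_ends
  have hne : header.toList ≠ [] := by
    intro hnil; apply hpre; simp_all
  have hlen0 : 0 < header.toList.length := List.length_pos_of_ne_nil hne
  obtain ⟨h, t, hs⟩ := List.exists_cons_of_ne_nil hne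
  have hfirst : PySem.List.pyGetD header.toList 0 ' ' = h := by
    rw [hs, PySem.List.pyGetD_zero_cons]
  have hA := lemA header.toList (header.toList.length - 1) 0 (by omega) hlen0 []
  simp only [Nat.cast_zero, zero_add, List.nil_append, List.drop_one] at hA
  rw [hfirst] at hA
  have hdt : header.toList.tail = t := by rw [hs]; rfl
  rw [hdt] at hA
  have hscan : scanEnds header.toList false 0 = scanEnds t (is_char h) 1 := by
    rw [hs]; simp [scanEnds, is_char]
  have hAval : get_content_ends header = scanEnds t (is_char h) 1 := by
    unfold get_content_ends
    cases hc : is_char (PySem.List.pyGetD header.toList (-1) ' ')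
    · rw [hc] at hA
      simp only [Bool.false_eq_true, if_false, List.append_nil] at hA
      simp only [hc, Bool.false_eq_true, if_false]
      exact hA
    · rw [hc] at hA
      simp only [if_true] at hA
      simp only [hc, if_true]
      exact hA
  rw [hAval, altB, hscan]
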